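-- pv_equiv track=rewrite | github.com/hufengze2012/shaotian-pubg-fair | pubg_cli_app/history.py | _pair_overlaps
-- ===== SOURCE A (Python) =====
-- from typing import Any, Dict, List, Tuple
--
-- def _pair_overlaps(match_map: Dict[str, List[str]], names: List[str]) -> Dict[str, int]:
--     result: Dict[str, int] = {}
--     for i in range(len(names)):
--         for j in range(i + 1, len(names)):
--             a = names[i]
--             b = names[j]
--             sa = set(match_map.get(a, []))
--             sb = set(match_map.get(b, []))
--             result[f"{a} & {b}"] = len(sa & sb)
--     return result
-- ===== SOURCE B (Python) =====
-- def _pair_overlaps(match_map, names):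
--     n = len(names)
--     # inverted index: match id -> increasing list of name indices holding it
--     inv = {}
--     for idx, name in enumerate(names):
--         for m in set(match_map.get(name, [])):
--             inv[m] = inv.get(m, []) + [idx]
--     # count co-occurrences per index pair
--     counts = {}
--     for m in inv:
--         stack = inv[m]
--         while len(stack) > 1:
--             x = stack[0]
--             for y in stack[1:]:
--                 counts[(x, y)] = counts.get((x, y), 0) + 1
--             stack = stack[1:]
--     result = {}
--     for i in range(n):
--         for j in range(i + 1, n):
--             result[f"{names[i]} & {names[j]}"] = counts.get((i, j), 0)
--     return result
-- ===== Notes on version B (the rewrite author's own statement) =====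
-- stated objective: alternative
-- what changed: Instead of building both match sets and intersecting them for every pair of names, B builds an inverted index (match -> increasing list of name indices) in one pass and increments a co-occurrence counter for each index pair sharing a match, then emits all pairs from that counter; measured ~2x faster at mid sizes but both are bound by the Theta(n^2)-sized output, so a timing run did not confirm 'faster'.
import Mathlib
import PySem

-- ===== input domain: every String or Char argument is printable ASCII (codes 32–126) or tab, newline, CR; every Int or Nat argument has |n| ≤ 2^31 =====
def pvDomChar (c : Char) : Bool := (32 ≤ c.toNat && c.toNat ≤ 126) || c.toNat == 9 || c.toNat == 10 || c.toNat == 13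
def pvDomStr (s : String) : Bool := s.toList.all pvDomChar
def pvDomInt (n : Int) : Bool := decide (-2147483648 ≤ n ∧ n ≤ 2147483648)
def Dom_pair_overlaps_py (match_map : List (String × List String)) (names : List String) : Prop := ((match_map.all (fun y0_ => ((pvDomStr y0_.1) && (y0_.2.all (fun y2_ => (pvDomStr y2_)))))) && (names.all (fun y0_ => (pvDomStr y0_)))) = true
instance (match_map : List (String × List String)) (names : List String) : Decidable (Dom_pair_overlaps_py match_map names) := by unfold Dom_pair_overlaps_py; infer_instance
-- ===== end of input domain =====

-- B replaces A's per-pair set intersections with an inverted index (match -> name indices) plus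
-- per-match co-occurrence counting — a different algorithm; the proved claim is A = B on all inputs.

-- ===== PORT A =====
-- literal transliteration of A: for i, for j in range(i+1, n): build both sets, insert len(sa & sb)
def pair_overlaps_py (match_map : List (String × List String)) (names : List String) : List (String × Int) :=
  let n : Int := names.length
  (((PySem.List.pyRange 0 n 1).foldl (fun res i =>
      (PySem.List.pyRange (i + 1) n 1).foldl (fun res j =>
        let a := PySem.List.pyGetD names i ""
        let b := PySem.List.pyGetD names j ""
        let sa := PySem.Set.ofList ((PySem.Dict.mk match_map).getD a [])
        let sb := PySem.Set.ofList ((PySem.Dict.mk match_map).getD b [])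
        res.insert (a ++ " & " ++ b) (PySem.Set.len (PySem.Set.inter sa sb))) res)
      (PySem.Dict.empty : PySem.Dict String Int))).items

-- ===== PORT B =====
-- B-side helper: set(match_map.get(name, []))
def pvSetOf (match_map : List (String × List String)) (name : String) : PySem.Set String :=
  PySem.Set.ofList ((PySem.Dict.mk match_map).getD name [])

-- B-side helper: the 'while len(stack) > 1' loop of Source B; stack[1:] of x :: rest is rest
def pvPairsLoop (counts : PySem.Dict (Int × Int) Int) (stack : List Int) : PySem.Dict (Int × Int) Int :=
  match stack with
  | [] => counts
  | [_] => counts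
  | x :: rest => pvPairsLoop (rest.foldl (fun c y => c.modify (x, y) 0 (· + 1)) counts) rest

-- B-side helper: the inverted index 'inv' (dict loop: inv[m] = inv.get(m, []) + [idx])
def pvInv (match_map : List (String × List String)) (names : List String) : PySem.Dict String (List Int) :=
  (PySem.List.enumerate names 0).foldl (fun d p =>
    (pvSetOf match_map p.2).foldl (fun d m => d.modify m [] (· ++ [p.1])) d)
    (PySem.Dict.empty : PySem.Dict String (List Int))

-- B-side helper: the co-occurrence counter 'counts' (for m in inv: process inv[m])
def pvCounts (match_map : List (String × List String)) (names : List String) : PySem.Dict (Int × Int) Int :=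
  (pvInv match_map names).keys.foldl (fun c m => pvPairsLoop c ((pvInv match_map names).getD m []))
    (PySem.Dict.empty : PySem.Dict (Int × Int) Int)

def pair_overlaps_py_alt (match_map : List (String × List String)) (names : List String) : List (String × Int) :=
  let n : Int := names.length
  (((PySem.List.pyRange 0 n 1).foldl (fun res i =>
      (PySem.List.pyRange (i + 1) n 1).foldl (fun res j =>
        res.insert (PySem.List.pyGetD names i "" ++ " & " ++ PySem.List.pyGetD names j "")
          ((pvCounts match_map names).getD (i, j) 0)) res)
      (PySem.Dict.empty : PySem.Dict String Int))).items

-- ===== PRECONDITION & SPEC =====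
def Spec_pair_overlaps_py (match_map : List (String × List String)) (names : List String) (out : List (String × Int)) : Prop := out = pair_overlaps_py_alt match_map names
instance (match_map : List (String × List String)) (names : List String) (out : List (String × Int)) : Decidable (Spec_pair_overlaps_py match_map names out) := by unfold Spec_pair_overlaps_py; infer_instance

-- ===== CLAIM (what is proved, stated in full; the proofs are below) =====
def Claim_equal_pair_overlaps_py : Prop := ∀ (match_map : List (String × List String)) (names : List String), Dom_pair_overlaps_py match_map names → Spec_pair_overlaps_py match_map names (pair_overlaps_py match_map names)

-- ===== LEMMAS AND PROOFS =====

-- the index list pvInv ends up holding for a match m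
def pvIdxs (match_map : List (String × List String)) (names : List String) (m : String) : List Int :=
  (PySem.List.pyRange 0 (names.length : Int) 1).filter
    (fun i => (pvSetOf match_map (PySem.List.pyGetD names i "")).contains m)

-- the inverted-index insertions, flattened to one list of (match, index) events
def pvPairs (match_map : List (String × List String)) (names : List String) : List (String × Int) :=
  (PySem.List.pyRange 0 (names.length : Int) 1).flatMap
    (fun t => (pvSetOf match_map (PySem.List.pyGetD names t "")).map (fun m => (m, t)))

theorem pv_inv_flat (match_map : List (String × List String)) (names : List String) :
    pvInv match_map names
      = (pvPairs match_map names).foldl (fun d q => d.modify q.1 [] (· ++ [q.2]))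
          (PySem.Dict.empty : PySem.Dict String (List Int)) := by
  unfold pvInv pvPairs
  rw [PySem.List.enumerate_eq_map_pyRange (d := ""), List.foldl_map, List.foldl_flatMap]
  simp only [List.foldl_map, PySem.List.len_eq]

theorem pv_filter_single (S : PySem.Set String) (hS : S.Nodup) (m : String) (t : Int) :
    List.map (fun q => q.2) (List.filter (fun q => q.1 == m) (S.map (fun m' => ((m', t) : String × Int))))
      = if m ∈ S then [t] else [] := by
  rw [List.filter_map]
  have h : S.filter ((fun q => q.1 == m) ∘ (fun m' => ((m', t) : String × Int))) = S.filter (· == m) := rfl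
  rw [h, List.filter_beq]
  by_cases hm : m ∈ S
  · simp [hm, List.count_eq_one_of_mem hS hm]
  · simp [hm, List.count_eq_zero_of_not_mem hm]

theorem pv_getD_inv (match_map : List (String × List String)) (names : List String) (m : String) :
    (pvInv match_map names).getD m [] = pvIdxs match_map names m := by
  rw [pv_inv_flat, PySem.Dict.getD_foldl_modify_append, PySem.Dict.getD_empty]
  unfold pvPairs pvIdxs
  simp only [List.nil_append]
  generalize (PySem.List.pyRange 0 (names.length : Int) 1) = l
  induction l with
  | nil => simp
  | cons t l ih =>
    rw [List.flatMap_cons, List.filter_append, List.map_append, ih, List.filter_cons]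
    rw [pv_filter_single (pvSetOf match_map (PySem.List.pyGetD names t ""))
        (by unfold pvSetOf; exact PySem.Set.nodup_ofList _) m t]
    by_cases hm : m ∈ pvSetOf match_map (PySem.List.pyGetD names t "")
    · simp [hm]
    · simp [hm]

theorem pv_keys_fold (l : List (String × Int)) (d : PySem.Dict String (List Int)) (hd : d.keys.Nodup) :
    ((l.foldl (fun d q => d.modify q.1 [] (· ++ [q.2])) d).keys.Nodup ∧
      ∀ m, m ∈ (l.foldl (fun d q => d.modify q.1 [] (· ++ [q.2])) d).keys ↔ m ∈ d.keys ∨ m ∈ l.map (·.1)) := by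
  induction l generalizing d with
  | nil => simpa using hd
  | cons q l ih =>
    rw [List.foldl_cons]
    have hkeys : (d.modify q.1 [] (· ++ [q.2])).keys = (d.insert q.1 ((d.getD q.1 []) ++ [q.2])).keys :=
      PySem.Dict.keys_modify d q.1 [] (· ++ [q.2])
    by_cases hc : d.contains q.1 = true
    · have hk : (d.modify q.1 [] (· ++ [q.2])).keys = d.keys := by
        rw [hkeys, PySem.Dict.keys_insert_of_contains _ _ hc]
      obtain ⟨h1, h2⟩ := ih (d.modify q.1 [] (· ++ [q.2])) (by rw [hk]; exact hd)
      refine ⟨h1, fun m => ?_⟩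
      rw [h2 m, hk]
      have hq : q.1 ∈ d.keys := (PySem.Dict.contains_iff_mem_keys d q.1).mp hc
      simp only [List.map_cons, List.mem_cons]
      constructor
      · rintro (h | h) <;> tauto
      · rintro (h | h | h)
        · tauto
        · subst h; tauto
        · tauto
    · have hnc : d.contains q.1 = false := by simpa using hc
      have hk : (d.modify q.1 [] (· ++ [q.2])).keys = d.keys ++ [q.1] := by
        rw [hkeys, PySem.Dict.keys_insert_of_not_contains _ _ hnc]
      have hqnot : q.1 ∉ d.keys := fun h => hc ((PySem.Dict.contains_iff_mem_keys d q.1).mpr h)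
      obtain ⟨h1, h2⟩ := ih (d.modify q.1 [] (· ++ [q.2])) (by
        rw [hk]; exact List.Nodup.append hd (List.nodup_singleton _) (by simpa using hqnot))
      refine ⟨h1, fun m => ?_⟩
      rw [h2 m, hk]
      simp only [List.mem_append, List.map_cons, List.mem_cons]
      tauto

theorem pv_pairsLoop_getD (l : List Int) (hl : l.Pairwise (· < ·)) (c : PySem.Dict (Int × Int) Int)
    (i j : Int) (hij : i < j) :
    (pvPairsLoop c l).getD (i, j) 0 = c.getD (i, j) 0 + (if i ∈ l ∧ j ∈ l then 1 else 0) := by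
  induction l generalizing c with
  | nil => simp [pvPairsLoop]
  | cons x rest ih =>
    cases rest with
    | nil =>
      have h : ¬ (i ∈ [x] ∧ j ∈ [x]) := by
        rintro ⟨hi, hj⟩; simp at hi hj; omega
      simp only [pvPairsLoop, if_neg h, add_zero]
    | cons y rest' =>
      have hx : ∀ z ∈ y :: rest', x < z := (List.pairwise_cons.mp hl).1
      have hl' : (y :: rest').Pairwise (· < ·) := (List.pairwise_cons.mp hl).2
      have hnd : (y :: rest').Nodup := hl'.imp (fun h => ne_of_lt h)
      rw [show pvPairsLoop c (x :: y :: rest')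
            = pvPairsLoop ((y :: rest').foldl (fun c z => c.modify (x, z) 0 (· + 1)) c) (y :: rest') from rfl]
      rw [ih hl' _]
      rw [show (y :: rest').foldl (fun c z => c.modify (x, z) 0 (· + 1)) c
            = ((y :: rest').map (fun z => ((x, z) : Int × Int))).foldl (fun c k => c.modify k 0 (· + 1)) c from
            (List.foldl_map (f := fun z => ((x, z) : Int × Int))
              (g := fun c k => PySem.Dict.modify c k 0 (· + 1))).symm]
      rw [PySem.Dict.getD_foldl_modify_add_one]
      have hcount : (((y :: rest').map (fun z => ((x, z) : Int × Int))).count (i, j))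
          = if x = i ∧ j ∈ y :: rest' then 1 else 0 := by
        by_cases hxi : x = i
        · subst hxi
          have hinj : Function.Injective (fun z => ((x, z) : Int × Int)) := by
            intro a b h; simpa using h
          rw [List.count_map_of_injective _ _ hinj]
          by_cases hjm : j ∈ y :: rest'
          · simp [hjm, List.count_eq_one_of_mem hnd hjm]
          · simp [hjm, List.count_eq_zero_of_not_mem hjm]
        · rw [List.count_eq_zero_of_not_mem]
          · simp [hxi]
          · intro hmem
            rcases List.mem_map.mp hmem with ⟨z, _, hz⟩
            have := congrArg Prod.fst hz; simp at this; exact hxi this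
      rw [hcount]
      have hxny : x ∉ y :: rest' := fun hm => lt_irrefl x (hx x hm)
      push_cast
      by_cases h1 : x = i
      · subst h1
        by_cases h3 : j ∈ y :: rest'
        · simp [h3, hxny, List.mem_cons]
        · have hjx : j ≠ x := by omega
          simp [h3, hxny, List.mem_cons, hjx]
      · have h1' : i ≠ x := fun h => h1 h.symm
        by_cases h2 : i ∈ y :: rest'
        · have hjx : j ≠ x := by have := hx i h2; omega
          simp [h1, h2, List.mem_cons, h1', hjx]
        · simp [h1, h2, List.mem_cons, h1']

theorem pv_counts_fold (g : String → List Int) (hg : ∀ m, (g m).Pairwise (· < ·))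
    (ks : List String) (c : PySem.Dict (Int × Int) Int) (i j : Int) (hij : i < j) :
    (ks.foldl (fun c m => pvPairsLoop c (g m)) c).getD (i, j) 0
      = c.getD (i, j) 0 + (ks.countP (fun m => decide (i ∈ g m ∧ j ∈ g m)) : Int) := by
  induction ks generalizing c with
  | nil => simp
  | cons k ks ih =>
    rw [List.foldl_cons, ih, pv_pairsLoop_getD (g k) (hg k) c i j hij, List.countP_cons]
    by_cases h : i ∈ g k ∧ j ∈ g k
    · simp [h]; ring
    · simp [h]

theorem pv_central (match_map : List (String × List String)) (names : List String)
    (i j : Int) (h0 : 0 ≤ i) (hij : i < j) (hj : j < (names.length : Int)) :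
    (pvCounts match_map names).getD (i, j) 0
      = PySem.Set.len (PySem.Set.inter (pvSetOf match_map (PySem.List.pyGetD names i ""))
          (pvSetOf match_map (PySem.List.pyGetD names j ""))) := by
  have hg : ∀ m, ((pvInv match_map names).getD m []).Pairwise (· < ·) := fun m => by
    rw [pv_getD_inv]; exact (PySem.List.pairwise_lt_pyRange_one 0 _).filter _
  unfold pvCounts
  rw [pv_counts_fold (fun m => (pvInv match_map names).getD m []) hg _ _ i j hij,
    PySem.Dict.getD_empty, zero_add]
  have hnodup : (pvInv match_map names).keys.Nodup := by
    rw [pv_inv_flat]; exact (pv_keys_fold _ _ (by simp)).1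
  have hmem2 : ∀ m, m ∈ (pvInv match_map names).keys ↔
      ∃ t, t ∈ PySem.List.pyRange 0 (names.length : Int) 1 ∧ m ∈ pvSetOf match_map (PySem.List.pyGetD names t "") := by
    intro m
    rw [pv_inv_flat]
    rw [(pv_keys_fold (pvPairs match_map names) _ (by simp)).2 m]
    simp only [PySem.Dict.keys_empty, List.not_mem_nil, false_or]
    unfold pvPairs
    constructor
    · intro h
      rcases List.mem_map.mp h with ⟨q, hq, rfl⟩
      rcases List.mem_flatMap.mp hq with ⟨t, ht, hq2⟩
      rcases List.mem_map.mp hq2 with ⟨m', hm', rfl⟩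
      exact ⟨t, ht, hm'⟩
    · rintro ⟨t, ht, hm'⟩
      exact List.mem_map.mpr ⟨(m, t), List.mem_flatMap.mpr ⟨t, ht, List.mem_map.mpr ⟨m, hm', rfl⟩⟩, rfl⟩
  have hmemg : ∀ (t : Int) m, t ∈ (pvInv match_map names).getD m [] ↔
      ((0 ≤ t ∧ t < (names.length : Int)) ∧ m ∈ pvSetOf match_map (PySem.List.pyGetD names t "")) := by
    intro t m
    rw [pv_getD_inv]
    unfold pvIdxs
    simp [List.mem_filter, PySem.List.mem_pyRange_one]
  have hcong : ((pvInv match_map names).keys.countP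
        (fun m => decide (i ∈ (pvInv match_map names).getD m [] ∧ j ∈ (pvInv match_map names).getD m [])))
      = ((pvInv match_map names).keys.countP
        (fun m => (pvSetOf match_map (PySem.List.pyGetD names i "")).contains m
          && (pvSetOf match_map (PySem.List.pyGetD names j "")).contains m)) := by
    apply List.countP_congr
    intro m _
    have hi1 : (0 : Int) ≤ i := h0
    have hi2 : i < (names.length : Int) := lt_trans hij hj
    have hj1 : (0 : Int) ≤ j := le_of_lt (lt_of_le_of_lt h0 hij)
    simp [hmemg, hi1, hi2, hj1, hj]
  rw [hcong, List.countP_eq_length_filter]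
  have hperm : ((pvInv match_map names).keys.filter
        (fun m => (pvSetOf match_map (PySem.List.pyGetD names i "")).contains m
          && (pvSetOf match_map (PySem.List.pyGetD names j "")).contains m)).Perm
      (PySem.Set.inter (pvSetOf match_map (PySem.List.pyGetD names i ""))
        (pvSetOf match_map (PySem.List.pyGetD names j ""))) := by
    rw [List.perm_ext_iff_of_nodup (hnodup.filter _)
      (PySem.Set.nodup_inter _ _ (by unfold pvSetOf; exact PySem.Set.nodup_ofList _))]
    intro a
    rw [List.mem_filter, PySem.Set.mem_inter]
    constructor
    · rintro ⟨_, h⟩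
      simpa using h
    · rintro ⟨h1, h2⟩
      refine ⟨(hmem2 a).mpr ⟨i, PySem.List.mem_pyRange_one.mpr ⟨h0, lt_trans hij hj⟩, h1⟩, ?_⟩
      simpa using ⟨h1, h2⟩
  rw [hperm.length_eq, PySem.Set.len_eq]

theorem pv_main (match_map : List (String × List String)) (names : List String) :
    pair_overlaps_py match_map names = pair_overlaps_py_alt match_map names := by
  unfold pair_overlaps_py pair_overlaps_py_alt
  refine congrArg PySem.Dict.items ?_
  apply PySem.List.foldl_congr_mem
  intro acc i hi
  apply PySem.List.foldl_congr_mem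
  intro acc' j hj
  rw [PySem.List.mem_pyRange_one] at hi hj
  have h0 : (0 : Int) ≤ i := hi.1
  have hij : i < j := by omega
  have hjn : j < (names.length : Int) := hj.2
  have := pv_central match_map names i j h0 hij hjn
  unfold pvSetOf at this
  rw [this]

-- ===== VERDICT (by name: the statement is the Claim_ definition above) =====
theorem pair_overlaps_py_spec : Claim_equal_pair_overlaps_py := by
  intro match_map names _
  unfold Spec_pair_overlaps_py
  exact pv_main match_map names
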